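-- pv_equiv track=rewrite | github.com/eatalay13/TypeScriptModelToDart | main.py | convert_to_dart_filename
-- ===== SOURCE A (Python) =====
-- def convert_to_dart_filename(file_name):
--     # Dosya adındaki "enum" kelimesi varsa kaldır. Büyük küçük harf duyarlılığı olsun
--     if "Enum" in file_name:
--         file_name = file_name.replace("Enum", "")
--
--     # Dosya adındaki ".ts" uzantısını kaldır
--     if file_name.endswith(".ts"):
--         file_name = file_name[:-3]
--
--     # Camel case'i snake case'e çevir
--     words = []
--     word = ""
--     for char in file_name:
--         if char.isupper():
--             if word:
--                 words.append(word.lower())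
--             word = char
--         else:
--             word += char
--     if word:
--         words.append(word.lower())
--
--     # Kelimeleri alt çizgi ile birleştir
--     dart_file_name = "_".join(words)
--
--     return dart_file_name + ".dart"
-- ===== SOURCE B (Python) =====
-- def _snake(s):
--     # Word-at-a-time loop: each iteration peels one whole word (first char plus
--     # the following non-uppercase run) off the front, then continues on the rest.
--     parts = []
--     while s:
--         i = 1
--         while i < len(s) and not s[i].isupper():
--             i += 1
--         parts.append(s[:i].lower())
--         s = s[i:]
--     return "_".join(parts)
--
-- def convert_to_dart_filename(file_name):
--     if "Enum" in file_name:
--         file_name = file_name.replace("Enum", "")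
--     if file_name.endswith(".ts"):
--         file_name = file_name[:-3]
--     return _snake(file_name) + ".dart"
-- ===== Notes on version B (the rewrite author's own statement) =====
-- stated objective: alternative
-- what changed: Replaces A's per-character fold that accumulates a current word and flushes it on each uppercase with a word-at-a-time loop that peels one whole word (head char plus the following non-uppercase run) per iteration and joins the collected words once.
import Mathlib
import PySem

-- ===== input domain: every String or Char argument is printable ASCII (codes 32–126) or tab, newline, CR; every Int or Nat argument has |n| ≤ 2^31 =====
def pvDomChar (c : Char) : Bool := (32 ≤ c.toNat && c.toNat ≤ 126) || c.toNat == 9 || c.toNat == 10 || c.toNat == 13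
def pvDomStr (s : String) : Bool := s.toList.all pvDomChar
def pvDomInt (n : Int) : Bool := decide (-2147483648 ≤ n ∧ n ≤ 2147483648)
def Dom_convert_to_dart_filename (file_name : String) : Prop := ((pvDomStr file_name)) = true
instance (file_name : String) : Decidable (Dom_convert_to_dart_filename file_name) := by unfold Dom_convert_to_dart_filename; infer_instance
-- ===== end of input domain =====

-- B peels one whole word per iteration (head char plus the following non-uppercase run) into a
-- list joined once, instead of A's per-character fold that flushes a current word on uppercase.


-- ===== PORT A =====
-- loop body of A: state = (words so far, current word)
def pvStepA (p : List (List Char) × List Char) (c : Char) : List (List Char) × List Char :=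
  if PySem.Chars.isupper c then
    (if p.2 ≠ [] then p.1 ++ [PySem.Chars.lower p.2] else p.1, [c])
  else (p.1, p.2 ++ [c])

def convert_to_dart_filename (file_name : String) : String :=
  let s0 := file_name.toList
  let s1 := if PySem.Chars.isIn "Enum".toList s0 then PySem.Chars.replace s0 "Enum".toList [] else s0
  let s2 := if PySem.Chars.endswith s1 ".ts".toList then PySem.Chars.slice s1 none (some (-3)) else s1
  let st := s2.foldl pvStepA ([], [])
  let words := if st.2 ≠ [] then st.1 ++ [PySem.Chars.lower st.2] else st.1
  String.ofList (PySem.Chars.join "_".toList words ++ ".dart".toList)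

-- ===== PORT B =====
-- B's _snake while-loop: each round removes one word (head char + following non-uppercase run)
-- from the front of s and appends its lowercase to parts.
def pvSnakeLoop (s : List Char) (parts : List (List Char)) : List (List Char) :=
  match s with
  | [] => parts
  | c :: rest =>
    pvSnakeLoop (rest.dropWhile (fun x => !PySem.Chars.isupper x))
      (parts ++ [PySem.Chars.lower (c :: rest.takeWhile (fun x => !PySem.Chars.isupper x))])
termination_by s.length
decreasing_by
  exact Nat.lt_succ_of_le (List.length_dropWhile_le _ _)

def convert_to_dart_filename_alt (file_name : String) : String :=
  let n0 := file_name.toList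
  let n1 := if PySem.Chars.isIn "Enum".toList n0 then PySem.Chars.replace n0 "Enum".toList [] else n0
  let n2 := if PySem.Chars.endswith n1 ".ts".toList then PySem.Chars.slice n1 none (some (-3)) else n1
  String.ofList (PySem.Chars.join "_".toList (pvSnakeLoop n2 []) ++ ".dart".toList)

-- ===== PRECONDITION & SPEC =====
def Spec_convert_to_dart_filename (file_name : String) (out : String) : Prop := out = convert_to_dart_filename_alt file_name
instance (file_name : String) (out : String) : Decidable (Spec_convert_to_dart_filename file_name out) := by unfold Spec_convert_to_dart_filename; infer_instance

-- ===== CLAIM (what is proved, stated in full; the proofs are below) =====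
def Claim_equal_convert_to_dart_filename : Prop := ∀ (file_name : String), Dom_convert_to_dart_filename file_name → Spec_convert_to_dart_filename file_name (convert_to_dart_filename file_name)

-- ===== LEMMAS AND PROOFS =====

-- A's final flush of the pending word
def pvFlushA (p : List (List Char) × List Char) : List (List Char) :=
  if p.2 ≠ [] then p.1 ++ [PySem.Chars.lower p.2] else p.1

theorem pvSnakeLoop_nil (parts : List (List Char)) : pvSnakeLoop [] parts = parts := by
  rw [pvSnakeLoop.eq_def]

theorem pvSnakeLoop_cons (c : Char) (rest : List Char) (parts : List (List Char)) :
    pvSnakeLoop (c :: rest) parts =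
      pvSnakeLoop (rest.dropWhile (fun x => !PySem.Chars.isupper x))
        (parts ++ [PySem.Chars.lower (c :: rest.takeWhile (fun x => !PySem.Chars.isupper x))]) := by
  rw [pvSnakeLoop.eq_def]

-- the first element surviving dropWhile fails the predicate
theorem pv_dropWhile_head {p : Char → Bool} : ∀ (l : List Char) (u : Char) (d' : List Char),
    List.dropWhile p l = u :: d' → p u = false := by
  intro l
  induction l with
  | nil => intro u d' h; simp at h
  | cons a t ih =>
    intro u d' h
    by_cases hp : p a = true
    · rw [List.dropWhile_cons_of_pos hp] at h
      exact ih u d' h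
    · rw [List.dropWhile_cons_of_neg hp] at h
      cases h
      simpa using hp

-- folding A's step over a run of non-uppercase chars only extends the current word
theorem pv_foldA_noUpper (t : List Char) : ∀ (ws : List (List Char)) (w : List Char),
    (∀ c ∈ t, PySem.Chars.isupper c = false) →
    t.foldl pvStepA (ws, w) = (ws, w ++ t) := by
  induction t with
  | nil => intro ws w _; simp
  | cons c t' ih =>
    intro ws w h
    have hc : PySem.Chars.isupper c = false := h c (by simp)
    simp only [List.foldl_cons, pvStepA, hc, Bool.false_eq_true, if_false]
    rw [ih ws (w ++ [c]) (fun x hx => h x (by simp [hx]))]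
    simp

-- the invariant: A's fold-then-flush from a nonempty pending word equals B's word-peeling loop
theorem pv_main : ∀ (n : Nat) (l : List Char), l.length ≤ n →
    ∀ (ws : List (List Char)) (w : List Char), w ≠ [] →
    pvFlushA (l.foldl pvStepA (ws, w)) =
      pvSnakeLoop (l.dropWhile (fun x => !PySem.Chars.isupper x))
        (ws ++ [PySem.Chars.lower (w ++ l.takeWhile (fun x => !PySem.Chars.isupper x))]) := by
  intro n
  induction n with
  | zero =>
    intro l hl ws w hw
    have : l = [] := List.length_eq_zero_iff.1 (Nat.le_zero.1 hl)
    subst this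
    simp [pvFlushA, pvSnakeLoop_nil, hw]
  | succ n ih =>
    intro l hl ws w hw
    have hsplit : l.takeWhile (fun x => !PySem.Chars.isupper x) ++
        l.dropWhile (fun x => !PySem.Chars.isupper x) = l := List.takeWhile_append_dropWhile
    have ht : ∀ c ∈ l.takeWhile (fun x => !PySem.Chars.isupper x),
        PySem.Chars.isupper c = false := by
      intro c hc
      have := List.mem_takeWhile_imp hc
      simpa using this
    conv_lhs => rw [← hsplit]
    rw [List.foldl_append, pv_foldA_noUpper _ ws w ht]
    cases hd : l.dropWhile (fun x => !PySem.Chars.isupper x) with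
    | nil =>
      simp [pvFlushA, pvSnakeLoop_nil, hw]
    | cons u d' =>
      have hu : PySem.Chars.isupper u = true := by
        have := pv_dropWhile_head l u d' hd
        simpa using this
      have hwt : w ++ l.takeWhile (fun x => !PySem.Chars.isupper x) ≠ [] := by
        simp [hw]
      have hstep : pvStepA (ws, w ++ l.takeWhile (fun x => !PySem.Chars.isupper x)) u =
          (ws ++ [PySem.Chars.lower (w ++ l.takeWhile (fun x => !PySem.Chars.isupper x))], [u]) := by
        simp [pvStepA, hu, hwt]
      have hlen : d'.length ≤ n := by
        have h1 : (u :: d').length ≤ l.length := by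
          rw [← hd]; exact List.length_dropWhile_le _ _
        simp only [List.length_cons] at h1
        omega
      rw [List.foldl_cons, hstep,
          ih d' hlen _ [u] (by simp),
          pvSnakeLoop_cons]
      simp [List.append_assoc]

-- ===== VERDICT (by name: the statement is the Claim_ definition above) =====
theorem convert_to_dart_filename_spec : Claim_equal_convert_to_dart_filename := by
  intro file_name _
  unfold Spec_convert_to_dart_filename convert_to_dart_filename convert_to_dart_filename_alt
  simp only
  congr 1
  congr 1
  set l := (if PySem.Chars.endswith
      (if PySem.Chars.isIn "Enum".toList file_name.toList
       then PySem.Chars.replace file_name.toList "Enum".toList [] else file_name.toList)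
      ".ts".toList
   then PySem.Chars.slice
      (if PySem.Chars.isIn "Enum".toList file_name.toList
       then PySem.Chars.replace file_name.toList "Enum".toList [] else file_name.toList)
      none (some (-3))
   else (if PySem.Chars.isIn "Enum".toList file_name.toList
         then PySem.Chars.replace file_name.toList "Enum".toList [] else file_name.toList)) with hl
  clear hl
  congr 1
  cases l with
  | nil => simp [pvSnakeLoop_nil]
  | cons c rest =>
    have hstep : pvStepA ([], []) c = ([], [c]) := by
      by_cases hu : PySem.Chars.isupper c = true <;> simp [pvStepA, hu]
    show pvFlushA ((c :: rest).foldl pvStepA ([], [])) = pvSnakeLoop (c :: rest) []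
    rw [List.foldl_cons, hstep,
        pv_main rest.length rest le_rfl [] [c] (by simp),
        pvSnakeLoop_cons]
    rfl
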